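-- pv_equiv track=rewrite | github.com/Axirr/Coding-Challenges | leetCode/python/dec2022/longestSubsequenceUnderSum.py | slowAnswerQueries
-- ===== SOURCE A (Python) =====
-- from typing import List
--
-- def slowAnswerQueries(nums: List[int], queries: List[int]) -> List[int]:
--     nums.sort()
--     originalSum = sum(nums)
--     result = []
--     for query in queries:
--         querySum = originalSum
--         i = len(nums) - 1
--         while querySum > query:
--             querySum -= nums[i]
--             i -= 1
--             if i < 0:
--                 break
--         result.append(i+1)
--     return result
-- ===== SOURCE B (Python) =====
-- from typing import List
--
-- def slowAnswerQueries(nums: List[int], queries: List[int]) -> List[int]: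
--     ns = sorted(nums)
--     prefix = [0]
--     for v in ns:
--         prefix.append(prefix[-1] + v)
--     # prefix is convex: it falls while the sorted elements are negative, then rises,
--     # so it attains its minimum right after the negative elements and is
--     # nondecreasing from there on.
--     neg = sum(1 for v in ns if v < 0)
--     out = []
--     for q in queries:
--         if prefix[neg] > q:
--             # even the minimal prefix sum exceeds q: no elements can be taken
--             out.append(0)
--             continue
--         # rightmost k with prefix[k] <= q, by binary search on the nondecreasing part
--         lo, hi = neg, len(prefix)
--         while hi - lo > 1:
--             mid = (lo + hi) // 2
--             if prefix[mid] <= q: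
--                 lo = mid
--             else:
--                 hi = mid
--         out.append(lo)
--     return out
-- ===== Notes on version B (the rewrite author's own statement) =====
-- stated objective: faster
-- what changed: A rescans the sorted list from the top for every query, subtracting elements one by one; B precomputes the prefix sums of the sorted list once (a convex sequence: falling over the negatives, then nondecreasing) and answers each query by binary search for the rightmost prefix sum <= query on the nondecreasing part; Pre_ excludes only empty nums with a negative query, where A raises IndexError.
-- crash fix: On nums = [] with any negative query A raises IndexError (nums[-1] on the empty list); B returns 0 for such queries. — e.g. on slowAnswerQueries([], [-1]): A raises IndexError, B returns [0]
import Mathlib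
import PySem

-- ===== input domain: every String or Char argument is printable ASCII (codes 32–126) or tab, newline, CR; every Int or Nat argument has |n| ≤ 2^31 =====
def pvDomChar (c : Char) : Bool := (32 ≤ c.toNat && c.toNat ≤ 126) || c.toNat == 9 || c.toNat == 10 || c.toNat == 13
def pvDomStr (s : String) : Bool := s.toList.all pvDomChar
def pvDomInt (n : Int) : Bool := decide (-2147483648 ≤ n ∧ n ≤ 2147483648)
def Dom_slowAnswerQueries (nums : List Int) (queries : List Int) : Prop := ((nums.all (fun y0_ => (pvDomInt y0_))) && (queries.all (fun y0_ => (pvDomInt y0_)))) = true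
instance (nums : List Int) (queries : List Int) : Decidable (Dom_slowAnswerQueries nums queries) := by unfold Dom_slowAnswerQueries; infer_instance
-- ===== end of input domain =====

-- B replaces A's per-query top-down subtraction scan by one prefix-sum precomputation and a
-- binary search per query (asymptotically faster). Note: Python A sorts `nums` in place (a
-- side effect B does not reproduce); the equivalence proved here is about the return value only.


-- ===== PORT A =====
-- the `while querySum > query` loop; fuel = len(nums) bounds the iterations (the loop runs at most len(nums) times)
def pvWhileA (ns : List Int) (query : Int) : Int → Int → Nat → Int
  | _, i, 0 => i + 1
  | qs, i, fuel+1 =>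
    if qs > query then
      match PySem.List.pyGet? ns i with
      | none => i + 1            -- Python raises IndexError here (only reachable for ns = []); excluded by Pre_
      | some v =>
        if i - 1 < 0 then (i - 1) + 1
        else pvWhileA ns query (qs - v) (i - 1) fuel
    else i + 1

def slowAnswerQueries (nums : List Int) (queries : List Int) : List Int :=
  let ns := PySem.List.sorted nums (fun x => x) false
  let originalSum := ns.sum
  queries.map (fun query => pvWhileA ns query originalSum ((ns.length : Int) - 1) ns.length)

-- ===== PORT B =====
-- the `while hi - lo > 1` binary-search loop of Source B; fuel = len(prefix) bounds the
-- iterations (the interval shrinks by at least one each turn)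
def pvSearch (pref : List Int) (q : Int) : Int → Int → Nat → Int
  | lo, _, 0 => lo
  | lo, hi, fuel+1 =>
    if hi - lo > 1 then
      let mid := PySem.Int.floordiv (lo + hi) 2
      match PySem.List.pyGet? pref mid with
      | none => lo               -- Python would raise IndexError; unreachable for 0 ≤ lo < mid < hi ≤ len pref
      | some x => if x ≤ q then pvSearch pref q mid hi fuel else pvSearch pref q lo mid fuel
    else lo

def slowAnswerQueries_alt (nums : List Int) (queries : List Int) : List Int :=
  let ns := PySem.List.sorted nums (fun x => x) false
  let pref := ns.foldl (fun acc v => acc ++ [PySem.List.pyGetD acc (-1) 0 + v]) [0]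
  let neg : Int := (ns.countP (fun v => decide (v < 0)) : Nat)
  queries.map (fun q =>
    match PySem.List.pyGet? pref neg with
    | none => 0                  -- Python would raise IndexError; unreachable since 0 ≤ neg < len pref
    | some pm =>
      if pm > q then 0
      else pvSearch pref q neg (pref.length : Int) pref.length)

-- ===== PRECONDITION & SPEC =====
-- Pre_ excludes exactly the inputs where A raises IndexError: empty nums together with a negative query.
def Pre_slowAnswerQueries (nums : List Int) (queries : List Int) : Prop :=
  nums = [] → ∀ q ∈ queries, 0 ≤ q
instance (nums : List Int) (queries : List Int) : Decidable (Pre_slowAnswerQueries nums queries) := by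
  unfold Pre_slowAnswerQueries; infer_instance

def pvWitness_slowAnswerQueries : List Int × List Int := ([1], [0])

-- On nums = [] with any negative query A raises IndexError (nums[-1] on the empty list); B returns 0 for such queries.
def Raises_slowAnswerQueries (nums : List Int) (queries : List Int) : Prop :=
  nums = [] ∧ ∃ q ∈ queries, q < 0
instance (nums : List Int) (queries : List Int) : Decidable (Raises_slowAnswerQueries nums queries) := by
  unfold Raises_slowAnswerQueries; infer_instance

def pvRaiseWitness_slowAnswerQueries : List Int × List Int := ([], [-1])
def pvRaiseWitnessOut_slowAnswerQueries : List Int := [0]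

def Spec_slowAnswerQueries (nums : List Int) (queries : List Int) (out : List Int) : Prop := out = slowAnswerQueries_alt nums queries
instance (nums : List Int) (queries : List Int) (out : List Int) : Decidable (Spec_slowAnswerQueries nums queries out) := by unfold Spec_slowAnswerQueries; infer_instance

-- ===== CLAIM (what is proved, stated in full; the proofs are below) =====
def Claim_equal_slowAnswerQueries : Prop := ∀ (nums : List Int) (queries : List Int), Dom_slowAnswerQueries nums queries → Pre_slowAnswerQueries nums queries → Spec_slowAnswerQueries nums queries (slowAnswerQueries nums queries)

def Claim_raises_slowAnswerQueries : Prop := (∀ (nums : List Int) (queries : List Int), Dom_slowAnswerQueries nums queries → Raises_slowAnswerQueries nums queries → ¬ Pre_slowAnswerQueries nums queries) ∧ (Dom_slowAnswerQueries (pvRaiseWitness_slowAnswerQueries.1) (pvRaiseWitness_slowAnswerQueries.2) ∧ Raises_slowAnswerQueries (pvRaiseWitness_slowAnswerQueries.1) (pvRaiseWitness_slowAnswerQueries.2) ∧ slowAnswerQueries_alt (pvRaiseWitness_slowAnswerQueries.1) (pvRaiseWitness_slowAnswerQueries.2) = pvRaiseWitnessOut_slowAnswerQueries)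

-- ===== LEMMAS AND PROOFS =====

-- prefix-sum function: pvP ns k = sum of the first k elements of ns
def pvP (ns : List Int) (k : Nat) : Int := (ns.take k).sum

-- A's loop specification: first k (scanning k, k-1, …) with p k ≤ q, else 0
def pvTop (p : Nat → Int) (q : Int) : Nat → Nat
  | 0 => 0
  | (k+1) => if p (k+1) ≤ q then k+1 else pvTop p q k

-- B's prefix-building loop, generalized over the accumulator
theorem pv_fold_pref (l : List Int) : ∀ (acc : List Int) (t : Int),
    l.foldl (fun acc v => acc ++ [PySem.List.pyGetD acc (-1) 0 + v]) (acc ++ [t])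
      = (acc ++ [t]) ++ (List.range l.length).map (fun k => t + (l.take (k+1)).sum) := by
  induction l with
  | nil => intro acc t; simp
  | cons v l ih =>
    intro acc t
    simp only [List.foldl_cons, PySem.List.pyGetD_neg_one_append_singleton]
    rw [show acc ++ [t] ++ [t + v] = (acc ++ [t]) ++ [t + v] from rfl, ih]
    have hr : (List.range (l.length + 1)).map (fun k => t + (((v :: l)).take (k+1)).sum)
        = (t + v) :: (List.range l.length).map (fun k => (t + v) + (l.take (k+1)).sum) := by
      rw [List.range_succ_eq_map, List.map_cons, List.map_map]
      congr 1
      · simp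
      · apply List.map_congr_left; intro a _; simp [Function.comp]; ring
    rw [List.length_cons, hr]
    simp [List.append_assoc]

theorem pv_pref_eq (ns : List Int) :
    ns.foldl (fun acc v => acc ++ [PySem.List.pyGetD acc (-1) 0 + v]) [0]
      = (List.range (ns.length + 1)).map (pvP ns) := by
  rw [show ([0] : List Int) = [] ++ [0] from rfl, pv_fold_pref]
  simp only [List.range_succ_eq_map, List.map_cons, List.map_map]
  simp [pvP]

-- in a sorted list, every index below the negative count holds a negative element …
theorem pv_neg_elt (ns : List Int) (hs : ns.Pairwise (· ≤ ·)) (k : Nat)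
    (hk : k < ns.countP (fun v => decide (v < 0))) (hkn : k < ns.length) : ns[k] < 0 := by
  by_contra h
  rw [not_lt] at h
  have hdrop : (ns.drop k).countP (fun v => decide (v < 0)) = 0 := by
    rw [List.countP_eq_zero]
    intro a ha
    obtain ⟨j, hj, rfl⟩ := List.mem_iff_getElem.mp ha
    have hjl : k + j < ns.length := by simp at hj; omega
    have he : (ns.drop k)[j] = ns[k + j]'hjl := by simp [List.getElem_drop]
    have hle : ns[k] ≤ ns[k + j]'hjl := by
      rcases Nat.eq_zero_or_pos j with rfl | hj0
      · simp
      · exact (List.pairwise_iff_getElem.mp hs) k (k + j) hkn hjl (by omega)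
    rw [he]
    simp
    omega
  have := List.countP_append (l₁ := ns.take k) (l₂ := ns.drop k) (p := fun v => decide (v < 0))
  rw [List.take_append_drop] at this
  have hle := List.countP_le_length (l := ns.take k) (p := fun v => decide (v < 0))
  simp [List.length_take] at hle
  omega

-- … and every index at or above it holds a nonnegative element
theorem pv_nonneg_elt (ns : List Int) (hs : ns.Pairwise (· ≤ ·)) (k : Nat)
    (hk : ns.countP (fun v => decide (v < 0)) ≤ k) (hkn : k < ns.length) : 0 ≤ ns[k] := by
  by_contra h
  rw [not_le] at h
  have htake : (ns.take (k+1)).countP (fun v => decide (v < 0)) = k + 1 := by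
    have hlen : (ns.take (k+1)).length = k + 1 := by simp [List.length_take]; omega
    have hall : ∀ a ∈ ns.take (k+1), (fun v => decide (v < 0)) a = true := ?_
    · exact (List.countP_eq_length.mpr hall).trans hlen
    intro a ha
    obtain ⟨j, hj, rfl⟩ := List.mem_iff_getElem.mp ha
    have hjl : j < ns.length := by simp at hj; omega
    have he : (ns.take (k+1))[j] = ns[j]'hjl := by simp [List.getElem_take]
    have hle : ns[j]'hjl ≤ ns[k] := by
      rcases Nat.lt_or_ge j k with hj0 | hj0
      · exact (List.pairwise_iff_getElem.mp hs) j k hjl hkn hj0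
      · have : j = k := by omega
        subst this; exact le_refl _
    rw [he]
    simp
    omega
  have := List.countP_append (l₁ := ns.take (k+1)) (l₂ := ns.drop (k+1)) (p := fun v => decide (v < 0))
  rw [List.take_append_drop] at this
  omega

theorem pv_P_succ (ns : List Int) (k : Nat) (hk : k < ns.length) :
    pvP ns (k+1) = pvP ns k + ns[k] := by
  simp only [pvP]
  rw [List.sum_take_succ ns k hk]

-- pvP is nondecreasing from the negative count on
theorem pv_P_mono (ns : List Int) (hs : ns.Pairwise (· ≤ ·)) (i j : Nat)
    (hi : ns.countP (fun v => decide (v < 0)) ≤ i) (hij : i ≤ j) (hj : j ≤ ns.length) :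
    pvP ns i ≤ pvP ns j := by
  induction j with
  | zero => have : i = 0 := by omega
            subst this; exact le_refl _
  | succ j ihj =>
    rcases Nat.lt_or_ge i (j+1) with hlt | hge
    · have h1 : pvP ns j ≤ pvP ns (j+1) := by
        rw [pv_P_succ ns j (by omega)]
        have := pv_nonneg_elt ns hs j (by omega) (by omega)
        omega
      exact le_trans (ihj (by omega) (by omega)) h1
    · have : i = j + 1 := by omega
      subst this; exact le_refl _

-- pvP attains its minimum at the negative count
theorem pv_P_min (ns : List Int) (hs : ns.Pairwise (· ≤ ·)) (k : Nat) (hk : k ≤ ns.length) :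
    pvP ns (ns.countP (fun v => decide (v < 0))) ≤ pvP ns k := by
  set m := ns.countP (fun v => decide (v < 0)) with hm
  have hmn : m ≤ ns.length := List.countP_le_length
  rcases Nat.lt_or_ge k m with hlt | hge
  · -- downward: pvP decreases strictly up to m
    have key : ∀ (d : Nat) (k : Nat), k + d = m → k ≤ m → pvP ns m ≤ pvP ns k := by
      intro d
      induction d with
      | zero => intro k h1 _; have : k = m := by omega
                subst this; exact le_refl _
      | succ d ihd =>
        intro k h1 h2
        have hne : k < m := by omega
        have hstep : pvP ns (k+1) ≤ pvP ns k := by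
          rw [pv_P_succ ns k (by omega)]
          have := pv_neg_elt ns hs k (by omega) (by omega)
          omega
        exact le_trans (ihd (k+1) (by omega) (by omega)) hstep
    exact key (m - k) k (by omega) (by omega)
  · exact pv_P_mono ns hs m k (le_refl _) hge hk

-- pvTop is 0 when no prefix sum with positive index is ≤ q
theorem pv_top_zero (p : Nat → Int) (q : Int) : ∀ (k : Nat),
    (∀ j, 1 ≤ j → j ≤ k → ¬ p j ≤ q) → pvTop p q k = 0 := by
  intro k
  induction k with
  | zero => intro _; rfl
  | succ k ih =>
    intro h
    simp only [pvTop]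
    rw [if_neg (h (k+1) (by omega) (by omega))]
    exact ih (fun j h1 h2 => h j h1 (by omega))

-- pvTop returns k0 when p k0 ≤ q and everything strictly above (up to k) is > q
theorem pv_top_eq (p : Nat → Int) (q : Int) : ∀ (k k0 : Nat), k0 ≤ k → p k0 ≤ q →
    (∀ j, k0 < j → j ≤ k → ¬ p j ≤ q) → pvTop p q k = k0 := by
  intro k
  induction k with
  | zero => intro k0 h _ _; interval_cases k0; rfl
  | succ k ih =>
    intro k0 hk0 hle h
    by_cases hcase : k0 = k+1
    · subst hcase
      simp only [pvTop]
      rw [if_pos hle]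
    · simp only [pvTop]
      rw [if_neg (h (k+1) (by omega) (by omega))]
      exact ih k0 (by omega) hle (fun j h1 h2 => h j h1 (by omega))

-- A's loop computes pvTop
theorem pv_whileA_eq (ns : List Int) (q : Int) : ∀ (j : Nat), ∀ (fuel : Nat),
    j < ns.length → j + 1 ≤ fuel →
    pvWhileA ns q (pvP ns (j+1)) ((j : Nat) : Int) fuel = ((pvTop (pvP ns) q (j+1) : Nat) : Int) := by
  intro j
  induction j with
  | zero =>
    intro fuel hj hfuel
    match fuel, hfuel with
    | fuel+1, _ =>
      simp only [pvWhileA, pvTop, Nat.cast_zero]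
      by_cases h : pvP ns (0+1) > q
      · rw [if_pos h]
        have hget : PySem.List.pyGet? ns (0 : Int) = some ns[0] := by
          rw [PySem.List.pyGet?_of_nonneg _ (by omega)]
          simp [hj]
        simp only [hget]
        rw [if_pos (by omega : (0:Int) - 1 < 0), if_neg (by omega : ¬ pvP ns (0+1) ≤ q)]
        norm_num
      · rw [if_neg h, if_pos (by omega : pvP ns (0+1) ≤ q)]
        norm_num
  | succ j ih =>
    intro fuel hj hfuel
    match fuel, hfuel with
    | fuel+1, _ =>
      simp only [pvWhileA, pvTop]
      by_cases h : pvP ns (j+1+1) > q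
      · rw [if_pos h]
        have hget : PySem.List.pyGet? ns (((j+1 : Nat)) : Int) = some ns[j+1] := by
          rw [PySem.List.pyGet?_of_nonneg _ (by omega)]
          simp [hj]
        simp only [hget]
        rw [if_neg (by push_cast; omega : ¬ (((j+1 : Nat)) : Int) - 1 < 0)]
        have hsub : pvP ns (j+1+1) - ns[j+1] = pvP ns (j+1) := by
          simp only [pvP]
          rw [List.sum_take_succ ns (j+1) hj]
          ring
        have harg : (((j+1 : Nat)) : Int) - 1 = ((j : Nat) : Int) := by push_cast; ring
        rw [hsub, harg, ih fuel (by omega) (by omega)]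
        rw [if_neg (by omega : ¬ pvP ns (j+1+1) ≤ q)]
        rfl
      · rw [if_neg h, if_pos (by omega : pvP ns (j+1+1) ≤ q)]
        push_cast; ring

-- binary-search invariant for B's while loop over the table of pvP values
theorem pv_search_inv (M : Nat → Int) (n : Nat) (q : Int) :
    ∀ (fuel : Nat) (lo hi : Int), 0 ≤ lo → lo < hi → hi ≤ (n : Int) + 1 →
    (hi - lo).toNat ≤ fuel + 1 → M lo.toNat ≤ q → (hi ≤ (n : Int) → ¬ M hi.toNat ≤ q) →
    (0 ≤ pvSearch ((List.range (n+1)).map M) q lo hi fuel ∧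
     pvSearch ((List.range (n+1)).map M) q lo hi fuel ≤ (n : Int) ∧
     lo ≤ pvSearch ((List.range (n+1)).map M) q lo hi fuel ∧
     M (pvSearch ((List.range (n+1)).map M) q lo hi fuel).toNat ≤ q ∧
     ((pvSearch ((List.range (n+1)).map M) q lo hi fuel) + 1 ≤ (n : Int) →
        ¬ M ((pvSearch ((List.range (n+1)).map M) q lo hi fuel).toNat + 1) ≤ q)) := by
  intro fuel
  induction fuel with
  | zero =>
    intro lo hi h0 hlh hhn hfuel hlo hhi
    have hhi1 : hi = lo + 1 := by omega
    simp only [pvSearch]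
    refine ⟨h0, by omega, le_refl _, hlo, ?_⟩
    intro h
    have : hi ≤ (n : Int) := by omega
    have := hhi this
    have he : hi.toNat = lo.toNat + 1 := by omega
    rwa [he] at this
  | succ fuel ih =>
    intro lo hi h0 hlh hhn hfuel hlo hhi
    simp only [pvSearch]
    by_cases hcase : hi - lo > 1
    · simp only [if_pos hcase]
      have hmid1 : lo + 1 ≤ PySem.Int.floordiv (lo + hi) 2 :=
        (PySem.Int.le_floordiv_iff_mul_le (by omega)).mpr (by omega)
      have hmid2 : PySem.Int.floordiv (lo + hi) 2 < hi :=
        (PySem.Int.floordiv_lt_iff_lt_mul (by omega)).mpr (by omega)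
      set mid := PySem.Int.floordiv (lo + hi) 2 with hmiddef
      have hmidn : mid.toNat < n + 1 := by omega
      have hget : PySem.List.pyGet? ((List.range (n+1)).map M) mid = some (M mid.toNat) := by
        rw [PySem.List.pyGet?_of_nonneg _ (by omega)]
        simp [hmidn]
      rw [hget]
      by_cases hle : M mid.toNat ≤ q
      · simp only [if_pos hle]
        have := ih mid hi (by omega) (by omega) hhn (by omega) hle hhi
        exact ⟨this.1, this.2.1, by omega, this.2.2.2.1, this.2.2.2.2⟩
      · simp only [if_neg hle]
        exact ih lo mid h0 (by omega) (by omega) (by omega) hlo (fun _ => hle)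
    · simp only [if_neg hcase]
      have hhi1 : hi = lo + 1 := by omega
      refine ⟨h0, by omega, le_refl _, hlo, ?_⟩
      intro h
      have : hi ≤ (n : Int) := by omega
      have := hhi this
      have he : hi.toNat = lo.toNat + 1 := by omega
      rwa [he] at this

-- per-query equality
theorem pv_query_eq (ns : List Int) (hs : ns.Pairwise (· ≤ ·)) (q : Int)
    (hq : ns = [] → 0 ≤ q) :
    pvWhileA ns q ns.sum ((ns.length : Int) - 1) ns.length
      = (match PySem.List.pyGet?
            (ns.foldl (fun acc v => acc ++ [PySem.List.pyGetD acc (-1) 0 + v]) [0])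
            ((ns.countP (fun v => decide (v < 0)) : Nat) : Int) with
         | none => 0
         | some pm =>
            if pm > q then 0
            else pvSearch (ns.foldl (fun acc v => acc ++ [PySem.List.pyGetD acc (-1) 0 + v]) [0]) q
              ((ns.countP (fun v => decide (v < 0)) : Nat) : Int)
              (((ns.foldl (fun acc v => acc ++ [PySem.List.pyGetD acc (-1) 0 + v]) [0]).length : Int))
              (ns.foldl (fun acc v => acc ++ [PySem.List.pyGetD acc (-1) 0 + v]) [0]).length) := by
  rw [pv_pref_eq ns]
  set n := ns.length with hn
  set m := ns.countP (fun v => decide (v < 0)) with hm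
  have hmn : m ≤ n := List.countP_le_length
  have hmn1 : m < n + 1 := by omega
  have hget : PySem.List.pyGet? ((List.range (n+1)).map (pvP ns)) ((m : Nat) : Int)
      = some (pvP ns m) := by
    rw [PySem.List.pyGet?_of_nonneg _ (by omega)]
    simp [Int.toNat_natCast, hmn1]
  rw [hget]
  dsimp only
  have hsum : ns.sum = pvP ns n := by simp [pvP, hn]
  by_cases hpm : pvP ns m > q
  · rw [if_pos hpm]
    -- no prefix sum is ≤ q, so A's loop runs off the bottom (or never finds one)
    have hall : ∀ j, 1 ≤ j → j ≤ n → ¬ pvP ns j ≤ q := by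
      intro j _ hj hle
      have hmin := pv_P_min ns hs j hj
      rw [← hm] at hmin
      omega
    rcases Nat.eq_zero_or_pos n with hn0 | hnpos
    · -- ns = []: pvP ns m = 0 > q contradicts Pre_ (q ≥ 0)
      have hnil : ns = [] := List.eq_nil_of_length_eq_zero hn0
      have : pvP ns m = 0 := by simp [pvP, hnil]
      have := hq hnil
      omega
    · obtain ⟨n', hn'⟩ : ∃ n', n = n' + 1 := ⟨n - 1, by omega⟩
      have hcast : ((n : Int) - 1) = ((n' : Nat) : Int) := by rw [hn']; push_cast; ring
      rw [hsum, hcast, hn', pv_whileA_eq ns q n' (n'+1) (by omega) (by omega)]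
      rw [pv_top_zero (pvP ns) q (n'+1) (fun j h1 h2 => hall j h1 (by omega))]
      norm_num
  · rw [if_neg hpm]
    have hlen : ((List.range (n+1)).map (pvP ns)).length = n + 1 := by simp
    rw [hlen, show ((n + 1 : Nat) : Int) = (n : Int) + 1 by push_cast; ring]
    have hinv := pv_search_inv (pvP ns) n q (n+1) ((m : Nat) : Int) ((n : Int) + 1)
      (by omega) (by omega) (le_refl _) (by omega)
      (by rw [Int.toNat_natCast]; omega)
      (fun h => absurd h (by omega))
    set r := pvSearch ((List.range (n+1)).map (pvP ns)) q ((m : Nat) : Int) ((n : Int) + 1) (n+1)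
      with hrdef
    obtain ⟨hr0, hrn, hrlo, hrle, hrtop⟩ := hinv
    have hup : ∀ j, r.toNat < j → j ≤ n → ¬ pvP ns j ≤ q := by
      intro j h1 h2 hle
      have h3 : r + 1 ≤ (n : Int) := by omega
      have h4 : m ≤ r.toNat + 1 := by omega
      exact hrtop h3 (le_trans (pv_P_mono ns hs (r.toNat + 1) j h4 (by omega) h2) hle)
    rcases Nat.eq_zero_or_pos n with hn0 | hnpos
    · -- ns = []: both sides are 0
      have hr : r = 0 := by omega
      rw [hr, hn0]
      simp [pvWhileA]
    · obtain ⟨n', hn'⟩ : ∃ n', n = n' + 1 := ⟨n - 1, by omega⟩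
      have hcast : ((n : Int) - 1) = ((n' : Nat) : Int) := by rw [hn']; push_cast; ring
      rw [hsum, hcast, hn', pv_whileA_eq ns q n' (n'+1) (by omega) (by omega)]
      rw [pv_top_eq (pvP ns) q (n'+1) r.toNat (by omega) hrle
        (fun j h1 h2 => hup j h1 (by omega))]
      omega

-- ===== VERDICT (by name: the statement is the Claim_ definition above) =====
theorem slowAnswerQueries_spec : Claim_equal_slowAnswerQueries := by
  intro nums queries _ hpre
  unfold Spec_slowAnswerQueries slowAnswerQueries slowAnswerQueries_alt
  simp only []
  apply List.map_eq_map_iff.mpr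
  intro q hqmem
  have hs : (PySem.List.sorted nums (fun x => x) false).Pairwise (· ≤ ·) := by
    have := PySem.List.sorted_pairwise (xs := nums) (key := fun x => x)
    exact this
  have hns : PySem.List.sorted nums (fun x => x) false = [] → 0 ≤ q := by
    intro he
    have hlen := PySem.List.length_sorted nums (fun x => x) false
    rw [he] at hlen
    simp only [List.length_nil] at hlen
    have : nums = [] := List.eq_nil_of_length_eq_zero (by omega)
    exact hpre this q hqmem
  exact pv_query_eq (PySem.List.sorted nums (fun x => x) false) hs q hns

@[simp] theorem slowAnswerQueries_raises : Claim_raises_slowAnswerQueries := by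
  unfold Claim_raises_slowAnswerQueries
  refine ⟨?_, by decide⟩
  intro nums queries _ hr hp
  obtain ⟨he, q, hq, hlt⟩ := hr
  exact absurd (hp he q hq) (by omega)
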